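-- pv_equiv track=rewrite | github.com/Phoenix10129/Codebusters-Scioly | app.py | porta_encode
-- ===== SOURCE A (Python) =====
-- alphabet_list = ['a', 'b', 'c', 'd', 'e', 'f', 'g', 'h', 'i', 'j', 'k', 'l', 'm', 'n', 'o', 'p', 'q', 'r', 's', 't', 'u', 'v', 'w', 'x', 'y', 'z']
--
-- def alphanumeric_decoder(plaintext_char, key_char):
--     res_sum = int(alphabet_list.index(plaintext_char) + int(alphabet_list.index(key_char) // 2))
--     res_diff = int(alphabet_list.index(plaintext_char) - int(alphabet_list.index(key_char) // 2))
--
--     if alphabet_list.index(plaintext_char) < 13: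
--         if res_sum < 13:
--             res_sum += 13
--         return res_sum
--     else:
--         if res_diff >= 13:
--             res_diff -= 13
--         return res_diff
--
-- def porta_encode(text, key):
--     encoded = []
--     repeated_key = (key * (len(text) // len(key) + 1))[:len(text)]
--
--     for i, char in enumerate(text):
--         if char.lower() in alphabet_list:
--             key_char = repeated_key[i].lower()
--             index = alphanumeric_decoder(char.lower(), key_char)
--             encoded_char = alphabet_list[index]
--             encoded.append(encoded_char.upper() if char.isupper() else encoded_char)
--         else:
--             encoded.append(char)
--     return ''.join(encoded)
-- ===== SOURCE B (Python) =====
-- _LOWER = "abcdefghijklmnopqrstuvwxyz"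
--
--
-- def _build_tableau():
--     # Porta tableau: row h = key_index // 2, column p = plaintext letter index.
--     rows = []
--     for h in range(13):
--         row = []
--         for p in range(26):
--             if p < 13:
--                 row.append(chr(97 + 13 + (p + h) % 13))
--             else:
--                 row.append(chr(97 + (p + 13 - h) % 13))
--         rows.append("".join(row))
--     return rows
--
--
-- _TABLEAU = _build_tableau()
--
--
-- def porta_encode(text, key):
--     n = len(key)
--     out = []
--     for i, ch in enumerate(text):
--         lc = ch.lower()
--         if lc in _LOWER:
--             kc = key[i % n].lower()
--             h = (ord(kc) - 97) // 2
--             c = _TABLEAU[h][ord(lc) - 97]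
--             out.append(c.upper() if ch.isupper() else c)
--         else:
--             out.append(ch)
--     return "".join(out)
-- ===== Notes on version B (the rewrite author's own statement) =====
-- stated objective: faster
-- what changed: Replaces A's per-letter work (two 26-element list.index scans plus a sum/difference branch in alphanumeric_decoder, and a materialized repeated-key string) with a 13x26 Porta tableau precomputed once and a single indexed lookup per character, keying by i % len(key).
import Mathlib
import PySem

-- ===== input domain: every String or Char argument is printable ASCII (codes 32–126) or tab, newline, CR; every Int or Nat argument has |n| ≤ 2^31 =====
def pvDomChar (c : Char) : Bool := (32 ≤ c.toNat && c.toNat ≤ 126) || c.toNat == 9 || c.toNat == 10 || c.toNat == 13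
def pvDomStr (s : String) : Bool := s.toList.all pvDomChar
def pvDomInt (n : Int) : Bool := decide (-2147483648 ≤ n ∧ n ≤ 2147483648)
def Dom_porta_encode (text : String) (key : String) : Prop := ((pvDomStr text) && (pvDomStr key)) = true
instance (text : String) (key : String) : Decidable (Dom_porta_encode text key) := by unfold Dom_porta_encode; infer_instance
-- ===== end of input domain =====

-- B replaces A's per-character Porta arithmetic (two list.index scans and branching per letter)
-- with a 13×26 tableau precomputed once and one lookup per character; objective: faster (constant factor).

-- ===== PORT A =====
def alphabet_list : List Char :=
  ['a','b','c','d','e','f','g','h','i','j','k','l','m',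
   'n','o','p','q','r','s','t','u','v','w','x','y','z']

def alphanumeric_decoder (plaintext_char : Char) (key_char : Char) : Int :=
  -- list.index raises ValueError when absent; Pre_ keeps such inputs out, .getD 0 is a junk default there
  let pi : Int := ((PySem.List.index? alphabet_list plaintext_char).getD 0 : Nat)
  let ki : Int := ((PySem.List.index? alphabet_list key_char).getD 0 : Nat)
  let res_sum := pi + PySem.Int.floordiv ki 2
  let res_diff := pi - PySem.Int.floordiv ki 2
  if pi < 13 then
    (if res_sum < 13 then res_sum + 13 else res_sum)
  else
    (if 13 ≤ res_diff then res_diff - 13 else res_diff)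

def porta_encode (text : String) (key : String) : String :=
  let tl := text.toList
  let kl := key.toList
  -- (key * (len(text) // len(key) + 1))[:len(text)]; len(key) = 0 raises ZeroDivisionError (outside Pre_)
  let repeated_key := (List.flatten (List.replicate (tl.length / kl.length + 1) kl)).take tl.length
  let encoded := (PySem.List.enumerate tl).foldl (fun acc ic =>
    if alphabet_list.contains (PySem.Chars.lowerChar ic.2) then
      let key_char := PySem.Chars.lowerChar ((PySem.List.pyGet? repeated_key ic.1).getD 'a')
      let index := alphanumeric_decoder (PySem.Chars.lowerChar ic.2) key_char
      let encoded_char := (PySem.List.pyGet? alphabet_list index).getD 'a'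
      acc ++ [if PySem.Chars.isupper ic.2 then PySem.Chars.upperChar encoded_char else encoded_char]
    else
      acc ++ [ic.2]) []
  String.ofList encoded

-- ===== PORT B =====
def bLower : List Char :=
  ['a','b','c','d','e','f','g','h','i','j','k','l','m',
   'n','o','p','q','r','s','t','u','v','w','x','y','z']

def bTableauRow (h : Nat) : List Char :=
  (List.range 26).map (fun p =>
    if p < 13 then Char.ofNat (97 + 13 + (p + h) % 13)
    else Char.ofNat (97 + (p + 13 - h) % 13))

def bTableau : List (List Char) := (List.range 13).map bTableauRow

def porta_encode_alt (text : String) (key : String) : String :=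
  let kl := key.toList
  let n := kl.length
  let out := (PySem.List.enumerate text.toList).foldl (fun acc ic =>
    if bLower.contains (PySem.Chars.lowerChar ic.2) then
      -- key[i % n]: i ≥ 0 (enumerate) so Python's i % n is i.toNat % n, a valid index (n ≠ 0 via Pre_)
      let kc := PySem.Chars.lowerChar (kl.getD (ic.1.toNat % n) 'a')
      let h := PySem.Int.floordiv ((kc.toNat : Int) - 97) 2
      let c := ((PySem.List.pyGet? bTableau h).getD []).getD ((PySem.Chars.lowerChar ic.2).toNat - 97) 'a'
      acc ++ [if PySem.Chars.isupper ic.2 then PySem.Chars.upperChar c else c]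
    else
      acc ++ [ic.2]) []
  String.ofList out

-- ===== PRECONDITION & SPEC =====
-- Pre_ excludes exactly the inputs on which A raises: key == "" (ZeroDivisionError), and any alphabetic
-- text position whose aligned key character is not a letter (ValueError from list.index).
def Pre_porta_encode (text : String) (key : String) : Prop :=
  key.toList.length ≠ 0 ∧
  ∀ i, i < text.toList.length →
    alphabet_list.contains (PySem.Chars.lowerChar (text.toList.getD i 'a')) = true →
    alphabet_list.contains (PySem.Chars.lowerChar (key.toList.getD (i % key.toList.length) 'a')) = true
instance (text : String) (key : String) : Decidable (Pre_porta_encode text key) := by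
  unfold Pre_porta_encode; infer_instance

def pvWitness_porta_encode : String × String := ("Hi there!", "key")

def Spec_porta_encode (text : String) (key : String) (out : String) : Prop := out = porta_encode_alt text key
instance (text : String) (key : String) (out : String) : Decidable (Spec_porta_encode text key out) := by unfold Spec_porta_encode; infer_instance

-- ===== CLAIM (what is proved, stated in full; the proofs are below) =====
def Claim_equal_porta_encode : Prop := ∀ (text : String) (key : String), Dom_porta_encode text key → Pre_porta_encode text key → Spec_porta_encode text key (porta_encode text key)

-- ===== LEMMAS AND PROOFS =====

-- a two-branch append-one loop is a map
theorem foldl_if_append {α β : Type} (p : α → Bool) (f g : α → β) (l : List α) :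
    l.foldl (fun acc x => if p x then acc ++ [f x] else acc ++ [g x]) []
      = l.map (fun x => if p x then f x else g x) := by
  have h : (fun (acc : List β) x => if p x then acc ++ [f x] else acc ++ [g x])
      = fun (acc : List β) x => acc ++ [if p x then f x else g x] := by
    funext acc x; split <;> rfl
  rw [h, PySem.List.foldl_append_singleton_eq_map, List.nil_append]

-- indexing the m-fold repetition of a nonempty list
theorem flatten_replicate_getElem? {α : Type} (kl : List α) (m k : Nat)
    (hk : k < m * kl.length) :
    (List.flatten (List.replicate m kl))[k]? = kl[k % kl.length]? := by
  induction m generalizing k with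
  | zero => omega
  | succ m ih =>
    have hn : kl.length ≠ 0 := by by_contra h; simp [h] at hk
    rw [List.replicate_succ, List.flatten_cons, List.getElem?_append]
    by_cases hlt : k < kl.length
    · simp [hlt, Nat.mod_eq_of_lt hlt]
    · have hk' : k - kl.length < m * kl.length := by
        rw [Nat.succ_mul] at hk; omega
      rw [if_neg hlt, ih _ hk']
      conv_rhs => rw [show k = kl.length + (k - kl.length) from by omega, Nat.add_mod_left]

-- the repeated key of A at a valid text position is key[k % len(key)]
theorem repeated_key_getD {α : Type} [Inhabited α] (kl : List α) (L k : Nat)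
    (hn : kl.length ≠ 0) (hk : k < L) (d : α) :
    ((List.flatten (List.replicate (L / kl.length + 1) kl)).take L).getD k d
      = kl.getD (k % kl.length) d := by
  have hk' : k < (L / kl.length + 1) * kl.length := by
    have h1 := Nat.div_add_mod L kl.length
    have h2 := Nat.mod_lt L (Nat.pos_of_ne_zero hn)
    rw [Nat.succ_mul, Nat.mul_comm (L / kl.length) kl.length]
    omega
  rw [List.getD_eq_getElem?_getD, List.getElem?_take, if_pos hk,
    flatten_replicate_getElem? kl _ k hk', ← List.getD_eq_getElem?_getD]

-- the per-letter core, as one boolean check the kernel evaluates: all 26×26 letter pairs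
set_option maxRecDepth 40000 in
set_option maxHeartbeats 2000000 in
theorem decoder_eq_tableau_bool :
    (alphabet_list.all fun lc => alphabet_list.all fun kc =>
      (PySem.List.pyGet? alphabet_list (alphanumeric_decoder lc kc)).getD 'a'
        == ((PySem.List.pyGet? bTableau
              (PySem.Int.floordiv ((kc.toNat : Int) - 97) 2)).getD []).getD (lc.toNat - 97) 'a') = true := by
  decide

-- the per-letter core: A's decoder-then-index equals B's tableau lookup
theorem decoder_eq_tableau :
    ∀ lc ∈ alphabet_list, ∀ kc ∈ alphabet_list,
      (PySem.List.pyGet? alphabet_list (alphanumeric_decoder lc kc)).getD 'a'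
        = ((PySem.List.pyGet? bTableau
              (PySem.Int.floordiv ((kc.toNat : Int) - 97) 2)).getD []).getD (lc.toNat - 97) 'a' := by
  have h := decoder_eq_tableau_bool
  rw [List.all_eq_true] at h
  intro lc hlc kc hkc
  have h2 := h lc hlc
  rw [List.all_eq_true] at h2
  exact eq_of_beq (h2 kc hkc)

set_option maxHeartbeats 1000000 in
theorem porta_encode_eq_alt (text key : String)
    (hpre : Pre_porta_encode text key) :
    porta_encode text key = porta_encode_alt text key := by
  obtain ⟨hn, hkey⟩ := hpre
  unfold porta_encode porta_encode_alt
  simp only [foldl_if_append]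
  congr 1
  apply List.map_congr_left
  intro ic hic
  obtain ⟨k, hk, rfl⟩ := (PySem.List.mem_enumerate_iff _ _ _).1 hic
  simp only [zero_add]
  by_cases hc : alphabet_list.contains (PySem.Chars.lowerChar text.toList[k]) = true
  · rw [if_pos hc, if_pos (show bLower.contains (PySem.Chars.lowerChar text.toList[k]) = true from hc)]
    have hrep : (PySem.List.pyGet?
        ((List.flatten (List.replicate (text.toList.length / key.toList.length + 1) key.toList)).take text.toList.length)
        (k : Int)).getD 'a'
        = key.toList.getD (k % key.toList.length) 'a' := by
      rw [PySem.List.pyGet?_natCast, ← List.getD_eq_getElem?_getD,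
        repeated_key_getD key.toList text.toList.length k hn hk]
    have hint : ((k : Int)).toNat = k := Int.toNat_natCast k
    rw [hint, hrep]
    have hkc : alphabet_list.contains
        (PySem.Chars.lowerChar (key.toList.getD (k % key.toList.length) 'a')) = true := by
      apply hkey k hk
      rw [List.getD_eq_getElem _ _ hk]
      exact hc
    have hcore := decoder_eq_tableau (PySem.Chars.lowerChar text.toList[k])
      (List.mem_of_elem_eq_true hc)
      (PySem.Chars.lowerChar (key.toList.getD (k % key.toList.length) 'a'))
      (List.mem_of_elem_eq_true hkc)
    rw [hcore]
  · rw [if_neg hc, if_neg (show ¬ bLower.contains (PySem.Chars.lowerChar text.toList[k]) = true from hc)]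

-- ===== VERDICT (by name: the statement is the Claim_ definition above) =====
theorem porta_encode_spec : Claim_equal_porta_encode := by
  intro text key _ hpre
  unfold Spec_porta_encode
  exact porta_encode_eq_alt text key hpre
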